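-- pv_equiv track=rewrite | github.com/hiper2d/algorithms-in-python | meta_hacker_cup/perfectlybalanced/perfectly_balanced.py | build_prefix_sum
-- ===== SOURCE A (Python) =====
-- import string
-- from typing import List
--
-- def build_prefix_sum(s: str) -> List[List[int]]:
--     n = len(s)
--     prefix_sum = [[0]*26 for _ in range(n+1)]
--     for i in range(1, n+1):
--         for j, c in enumerate(string.ascii_lowercase):
--             prefix_sum[i][j] = prefix_sum[i-1][j]
--             if s[i-1] == c:
--                 prefix_sum[i][j] += 1
--     return prefix_sum
-- ===== SOURCE B (Python) =====
-- import string
--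
-- def build_prefix_sum(s):
--     n = len(s)
--     cols = []
--     for c in string.ascii_lowercase:
--         total = 0
--         col = [0]
--         for ch in s:
--             if ch == c:
--                 total += 1
--             col.append(total)
--         cols.append(col)
--     return [[col[i] for col in cols] for i in range(n + 1)]
-- ===== Notes on version B (the rewrite author's own statement) =====
-- stated objective: alternative
-- what changed: Builds the table column-major: one cumulative-count column per letter (26 staged passes over s), then transposes the 26 columns into rows by indexing, instead of A's row-major single pass that rebuilds each row from the previous one.
import Mathlib
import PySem

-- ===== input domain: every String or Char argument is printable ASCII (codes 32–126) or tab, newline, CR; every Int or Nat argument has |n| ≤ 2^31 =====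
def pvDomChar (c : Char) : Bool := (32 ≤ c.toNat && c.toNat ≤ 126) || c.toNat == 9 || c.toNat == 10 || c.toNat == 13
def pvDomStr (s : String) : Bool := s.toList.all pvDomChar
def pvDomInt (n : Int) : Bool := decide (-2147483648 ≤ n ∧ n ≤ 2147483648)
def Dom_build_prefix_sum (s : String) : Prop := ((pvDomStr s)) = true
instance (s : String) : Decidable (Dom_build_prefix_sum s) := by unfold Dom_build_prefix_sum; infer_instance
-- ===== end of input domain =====

-- B builds the table column-major (one cumulative column per letter, then a transpose)
-- instead of A's row-major pass rebuilding each row from the previous one (objective: alternative).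

-- ===== PORT A =====
-- string.ascii_lowercase
def pvLower : List Char := "abcdefghijklmnopqrstuvwxyz".toList

def build_prefix_sum (s : String) : List (List Int) :=
  let cs := s.toList
  let n := cs.length
  -- prefix_sum = [[0]*26 for _ in range(n+1)]
  let init : List (List Int) := (List.range (n + 1)).map (fun _ => List.replicate 26 (0 : Int))
  -- for i in range(1, n+1): for j, c in enumerate(ascii_lowercase): row i built elementwise from row i-1
  (PySem.List.pyRange 1 ((n : Int) + 1) 1).foldl
    (fun tab i =>
      let prev := tab.getD (i.toNat - 1) []
      let c0 := cs.getD (i.toNat - 1) ' '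
      tab.set i.toNat (List.zipWith (fun p c => p + if c0 = c then 1 else 0) prev pvLower))
    init

-- ===== PORT B =====
def build_prefix_sum_alt (s : String) : List (List Int) :=
  let cs := s.toList
  let n := cs.length
  -- for c in ascii_lowercase: build one cumulative-count column (total, col) over s
  let cols : List (List Int) := pvLower.foldl
    (fun acc c =>
      acc ++ [(cs.foldl
        (fun (st : Int × List Int) ch =>
          let total := if ch = c then st.1 + 1 else st.1
          (total, st.2 ++ [total]))
        (0, [0])).2])
    []
  -- [[col[i] for col in cols] for i in range(n + 1)]  (col[i] is always in range)
  (List.range (n + 1)).map (fun i => cols.map (fun col => col.getD i 0))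

-- ===== PRECONDITION & SPEC =====
def Spec_build_prefix_sum (s : String) (out : List (List Int)) : Prop := out = build_prefix_sum_alt s
instance (s : String) (out : List (List Int)) : Decidable (Spec_build_prefix_sum s out) := by unfold Spec_build_prefix_sum; infer_instance

-- ===== CLAIM (what is proved, stated in full; the proofs are below) =====
def Claim_equal_build_prefix_sum : Prop := ∀ (s : String), Dom_build_prefix_sum s → Spec_build_prefix_sum s (build_prefix_sum s)

-- ===== LEMMAS AND PROOFS =====

-- A's per-character row update: compare against every lowercase letter
def pvStepA (v : List Int) (c0 : Char) : List Int :=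
  List.zipWith (fun p c => p + if c0 = c then 1 else 0) v pvLower

-- B's per-letter column step
def pvStepC (c : Char) (t : Int) (ch : Char) : Int :=
  if ch = c then t + 1 else t

theorem pv_stepA_len (v : List Int) (hv : v.length = 26) (ch : Char) :
    (pvStepA v ch).length = 26 := by
  simp [pvStepA, hv]; decide

theorem pv_scanl_head {α β : Type} (f : β → α → β) (b : β) (l : List α) :
    List.scanl f b l = b :: (List.scanl f b l).tail := by
  cases l <;> simp [List.scanl]

-- A's imperative table fill equals a scanl of pvStepA
theorem pv_A_loop (cs : List Char) :
    ∀ (rest pre : List Char) (P : List (List Int)) (v : List Int),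
      cs = pre ++ rest → P.length = pre.length + 1 → P.getD pre.length [] = v →
      ((PySem.List.pyRange ((pre.length : Int) + 1) ((cs.length : Int) + 1) 1).foldl
        (fun tab i =>
          let prev := tab.getD (i.toNat - 1) []
          let c0 := cs.getD (i.toNat - 1) ' '
          tab.set i.toNat (List.zipWith (fun p c => p + if c0 = c then 1 else 0) prev pvLower))
        (P ++ List.replicate rest.length (List.replicate 26 (0 : Int))))
        = P ++ (List.scanl pvStepA v rest).tail := by
  intro rest
  induction rest with
  | nil =>
    intro pre P v hcs hP _
    subst hcs
    rw [PySem.List.pyRange_one_eq_nil (by simp)]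
    simp [List.scanl]
  | cons c rest ih =>
    intro pre P v hcs hP hv
    have hlt : (pre.length : Int) + 1 < (cs.length : Int) + 1 := by
      subst hcs; simp
    rw [PySem.List.pyRange_one_cons hlt, List.foldl_cons]
    have htn : ((pre.length : Int) + 1).toNat = pre.length + 1 := by omega
    have hgetP : ((P ++ List.replicate (c :: rest).length (List.replicate 26 (0 : Int))).getD
        pre.length []) = v := by
      rw [← hv, List.getD, List.getElem?_append_left (by omega), ← List.getD]
    have hgetc : cs.getD pre.length ' ' = c := by
      subst hcs
      simp [List.getD]
    have hset : (P ++ List.replicate (c :: rest).length (List.replicate 26 (0 : Int))).set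
        (pre.length + 1) (pvStepA v c)
        = (P ++ [pvStepA v c]) ++ List.replicate rest.length (List.replicate 26 (0 : Int)) := by
      rw [List.set_append_right _ _ (by omega)]
      have : pre.length + 1 - P.length = 0 := by omega
      rw [this]
      simp [List.replicate_succ]
    simp only [htn, Nat.add_sub_cancel, hgetP, hgetc]
    rw [show (List.zipWith (fun p c' => p + if c = c' then 1 else 0) v pvLower) = pvStepA v c from rfl]
    rw [hset]
    have hstep := ih (pre ++ [c]) (P ++ [pvStepA v c]) (pvStepA v c)
      (by simp [hcs]) (by simp [hP])
      (by rw [List.getD, List.getElem?_append_right (by simp [hP])]; simp [hP])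
    have harg : ((pre ++ [c]).length : Int) + 1 = (pre.length : Int) + 1 + 1 := by
      simp
    rw [harg] at hstep
    rw [hstep]
    have htail : (List.scanl pvStepA v (c :: rest)).tail
        = pvStepA v c :: (List.scanl pvStepA (pvStepA v c) rest).tail := by
      rw [List.scanl_cons]
      simp only [List.tail_cons]
      exact pv_scanl_head pvStepA (pvStepA v c) rest
    rw [htail]
    simp [List.append_assoc]

-- B's inner append loop equals a scanl of pvStepC
theorem pv_colB_loop (c : Char) :
    ∀ (cs : List Char) (t : Int) (out : List Int),
      (cs.foldl
        (fun (st : Int × List Int) ch =>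
          let total := if ch = c then st.1 + 1 else st.1
          (total, st.2 ++ [total]))
        (t, out)).2 = out ++ (List.scanl (pvStepC c) t cs).tail := by
  intro cs
  induction cs with
  | nil => intro t out; simp [List.scanl]
  | cons ch cs ih =>
    intro t out
    simp only [List.foldl_cons, List.scanl_cons, List.tail_cons]
    rw [ih]
    rw [pv_scanl_head (pvStepC c) (pvStepC c t ch) cs]
    simp [pvStepC, List.append_assoc]

-- B's outer append loop is a map
theorem pv_foldl_append_map {α β : Type} (g : α → β) :
    ∀ (L : List α) (acc : List β),
      L.foldl (fun a c => a ++ [g c]) acc = acc ++ L.map g := by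
  intro L
  induction L with
  | nil => intro acc; simp
  | cons c L ih => intro acc; simp [ih, List.append_assoc]

theorem pv_zipWith_zipWith (f g : Int → Char → Int) :
    ∀ (v : List Int) (L : List Char),
      List.zipWith f (List.zipWith g v L) L
        = List.zipWith (fun x c => f (g x c) c) v L := by
  intro v
  induction v with
  | nil => intro L; simp
  | cons x v ih =>
    intro L
    cases L with
    | nil => simp
    | cons c L => simp [List.zipWith, ih]

theorem pv_zipWith_eq_self (f : Int → Char → Int) (hf : ∀ x c, f x c = x) :
    ∀ (v : List Int) (L : List Char), v.length ≤ L.length →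
      List.zipWith f v L = v := by
  intro v
  induction v with
  | nil => intro L _; simp
  | cons x v ih =>
    intro L h
    cases L with
    | nil => simp at h
    | cons c L =>
      simp only [List.length_cons, Nat.add_le_add_iff_right] at h ⊢
      simp [List.zipWith, hf, ih L h]

-- row i of A's scanl = per-letter counts of the length-i prefix, added to v
theorem pv_scanA_getD :
    ∀ (cs : List Char) (i : ℕ) (v : List Int), v.length = 26 → i ≤ cs.length →
      (List.scanl pvStepA v cs).getD i []
        = List.zipWith (fun x c => x + (((cs.take i).count c : ℕ) : Int)) v pvLower := by
  intro cs
  induction cs with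
  | nil =>
    intro i v hv hi
    have hi0 : i = 0 := by simpa using hi
    subst hi0
    simp only [List.scanl_nil, List.getD_cons_zero, List.take_nil]
    rw [pv_zipWith_eq_self _ (by intro x c; simp) v pvLower (by rw [hv]; decide)]
  | cons c0 cs ih =>
    intro i v hv hi
    cases i with
    | zero =>
      simp only [List.scanl_cons, List.getD_cons_zero, List.take_zero]
      rw [pv_zipWith_eq_self _ (by intro x c; simp) v pvLower (by rw [hv]; decide)]
    | succ i =>
      simp only [List.scanl_cons, List.getD_cons_succ]
      rw [ih i (pvStepA v c0) (pv_stepA_len v hv c0) (by simpa using hi)]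
      simp only [pvStepA, pv_zipWith_zipWith]
      congr 1
      funext x c
      by_cases h : c0 = c
      · subst h
        simp
        ring
      · have : ¬ (c0 == c) = true := by simpa using h
        simp [h]

-- entry i of B's column for letter c = count of c in the length-i prefix, added to t
theorem pv_scanC_getD (c : Char) :
    ∀ (cs : List Char) (i : ℕ) (t : Int), i ≤ cs.length →
      (List.scanl (pvStepC c) t cs).getD i 0
        = t + (((cs.take i).count c : ℕ) : Int) := by
  intro cs
  induction cs with
  | nil =>
    intro i t hi
    have hi0 : i = 0 := by simpa using hi
    subst hi0
    simp [List.scanl]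
  | cons c0 cs ih =>
    intro i t hi
    cases i with
    | zero => simp [List.scanl]
    | succ i =>
      simp only [List.scanl_cons, List.getD_cons_succ]
      rw [ih i (pvStepC c t c0) (by simpa using hi)]
      by_cases h : c0 = c
      · subst h
        simp [pvStepC]
        ring
      · have : ¬ (c0 == c) = true := by simpa using h
        simp [pvStepC, h]

theorem pv_zipWith_replicate_zero (f : Int → Char → Int) :
    ∀ (L : List Char),
      List.zipWith f (List.replicate L.length 0) L = L.map (f 0) := by
  intro L
  induction L with
  | nil => rfl
  | cons c L ih => simp [List.replicate_succ, ih]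

-- ===== VERDICT (by name: the statement is the Claim_ definition above) =====
theorem build_prefix_sum_spec : Claim_equal_build_prefix_sum := by
  intro s _
  simp only [Spec_build_prefix_sum, build_prefix_sum, build_prefix_sum_alt]
  set cs := s.toList with hcs
  -- A's table is the scanl of pvStepA from the zero row
  have hinit : (List.range (cs.length + 1)).map (fun _ => List.replicate 26 (0 : Int))
      = [List.replicate 26 (0 : Int)]
        ++ List.replicate cs.length (List.replicate 26 (0 : Int)) := by
    simp [List.map_const', List.replicate_succ]
  have hA := pv_A_loop cs cs [] [List.replicate 26 (0 : Int)]
    (List.replicate 26 (0 : Int)) (by simp) (by simp) (by simp [List.getD])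
  simp only [List.length_nil, Nat.cast_zero, zero_add] at hA
  rw [hinit, hA]
  have hAscan : [List.replicate 26 (0 : Int)]
      ++ (List.scanl pvStepA (List.replicate 26 (0 : Int)) cs).tail
      = List.scanl pvStepA (List.replicate 26 (0 : Int)) cs := by
    rw [pv_scanl_head pvStepA (List.replicate 26 (0 : Int)) cs]; rfl
  rw [hAscan]
  -- B's columns are scanls of pvStepC
  have hcols : pvLower.foldl
      (fun acc c =>
        acc ++ [(cs.foldl
          (fun (st : Int × List Int) ch =>
            let total := if ch = c then st.1 + 1 else st.1
            (total, st.2 ++ [total]))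
          (0, [0])).2]) []
      = pvLower.map (fun c => List.scanl (pvStepC c) 0 cs) := by
    rw [pv_foldl_append_map]
    simp only [List.nil_append]
    apply List.map_congr_left
    intro c _
    rw [pv_colB_loop c cs 0 [0]]
    rw [pv_scanl_head (pvStepC c) 0 cs]; rfl
  simp only [hcols]
  -- pointwise row equality
  apply List.ext_getElem
  · simp [List.length_scanl]
  · intro i h1 h2
    simp only [List.length_scanl] at h1
    have hi : i ≤ cs.length := by omega
    simp only [List.getElem_map, List.getElem_range, List.map_map]
    rw [← List.getD_eq_getElem _ [] (by simpa [List.length_scanl] using h1)]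
    rw [pv_scanA_getD cs i (List.replicate 26 (0 : Int)) (by simp) hi]
    have h26 : (26 : ℕ) = pvLower.length := by decide
    rw [show (List.replicate 26 (0 : Int)) = List.replicate pvLower.length 0 from by rw [← h26]]
    rw [pv_zipWith_replicate_zero]
    apply List.map_congr_left
    intro c _
    simp only [Function.comp]
    rw [pv_scanC_getD c cs i 0 hi]
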